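-- pv_equiv track=rewrite | github.com/fashioncrazy9/HackBulgaria_0 | Week_4/pairs.py | count_zero_pairs
-- ===== SOURCE A (Python) =====
-- def count_zero_pairs(numbers):
--     count = 0
--     n = len(numbers)
--
--     for index_1 in range(0, n):
--         for index_2 in range(index_1,n):
--             if numbers[index_1] + numbers[index_2] == 0:
--                 count += 1
--
--     return count
-- ===== SOURCE B (Python) =====
-- def count_zero_pairs(numbers):
--     seen = {}
--     count = 0
--     for x in numbers:
--         count += seen.get(-x, 0)
--         if x == 0:
--             count += 1
--         seen[x] = seen.get(x, 0) + 1
--     return count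
-- ===== Notes on version B (the rewrite author's own statement) =====
-- stated objective: faster
-- what changed: Replaced the quadratic double index loop with a single pass that keeps a hash-map counter of values seen so far, adding for each element the number of earlier opposite values (plus 1 for a zero, covering the i=j diagonal).
import Mathlib
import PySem

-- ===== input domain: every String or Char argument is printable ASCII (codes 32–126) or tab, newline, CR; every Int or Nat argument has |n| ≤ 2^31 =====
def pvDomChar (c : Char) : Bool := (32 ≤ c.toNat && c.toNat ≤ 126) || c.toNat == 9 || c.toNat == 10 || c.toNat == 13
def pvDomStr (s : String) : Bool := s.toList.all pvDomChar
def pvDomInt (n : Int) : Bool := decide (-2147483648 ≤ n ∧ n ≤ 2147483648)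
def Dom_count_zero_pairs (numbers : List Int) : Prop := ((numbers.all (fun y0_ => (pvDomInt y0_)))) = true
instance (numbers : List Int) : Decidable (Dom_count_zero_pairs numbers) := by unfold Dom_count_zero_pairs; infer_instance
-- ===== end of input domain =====

-- B replaces A's quadratic double index loop by one pass with a counter of already-seen values (asymptotically faster).


-- ===== PORT A =====
-- literal port of A's nested index loops; all indices lie in range, so pyGetD is exactly Python's numbers[i]
def count_zero_pairs (numbers : List Int) : Int :=
  let n := PySem.List.len numbers
  (PySem.List.pyRange 0 n 1).foldl (fun count i1 =>
    (PySem.List.pyRange i1 n 1).foldl (fun count i2 =>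
      if PySem.List.pyGetD numbers i1 0 + PySem.List.pyGetD numbers i2 0 == 0 then count + 1
      else count) count) 0

-- ===== PORT B =====
-- one pass; state = (count, dict of value → multiplicity among the elements already seen)
def count_zero_pairs_alt (numbers : List Int) : Int :=
  (numbers.foldl
    (fun (st : Int × PySem.Dict Int Int) x =>
      let count := st.1 + st.2.getD (-x) 0
      let count := if x == 0 then count + 1 else count
      (count, st.2.insert x (st.2.getD x 0 + 1)))
    (0, PySem.Dict.empty)).1

-- ===== PRECONDITION & SPEC =====
def Spec_count_zero_pairs (numbers : List Int) (out : Int) : Prop := out = count_zero_pairs_alt numbers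
instance (numbers : List Int) (out : Int) : Decidable (Spec_count_zero_pairs numbers out) := by unfold Spec_count_zero_pairs; infer_instance

-- ===== CLAIM (what is proved, stated in full; the proofs are below) =====
def Claim_equal_count_zero_pairs : Prop := ∀ (numbers : List Int), Dom_count_zero_pairs numbers → Spec_count_zero_pairs numbers (count_zero_pairs numbers)

-- ===== LEMMAS AND PROOFS =====

-- S t = A's count on t: each element paired against the whole suffix starting at it
def pvS : List Int → Int
  | [] => 0
  | x :: t => ((x :: t).count (-x) : Int) + pvS t

-- P pre t = B's count on t given already-seen prefix pre
def pvP (pre t : List Int) : Int :=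
  match t with
  | [] => 0
  | x :: r => (pre.count (-x) : Int) + (if x = 0 then 1 else 0) + pvP (pre ++ [x]) r

-- C pre t = cross pairs: elements of pre against opposite elements of t
def pvC (pre t : List Int) : Int := (pre.map (fun a => (t.count (-a) : Int))).sum

lemma pv_match_beq (b x : Int) : ((b + x == 0) : Bool) = (x == -b) := by
  by_cases h : b + x = 0
  · simp [show x = -b by omega]
  · simp [h]; omega

-- A's inner loop counts the matches of -numbers[i1] in the suffix from i1
lemma pvA_inner (xs : List Int) (a : Nat) (ha : a < xs.length) (c : Int) :
    (PySem.List.pyRange (a : Int) (PySem.List.len xs) 1).foldl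
      (fun count i2 =>
        if PySem.List.pyGetD xs (a : Int) 0 + PySem.List.pyGetD xs i2 0 == 0 then count + 1
        else count) c
    = c + (((xs.drop a).count (-(xs[a]))) : Int) := by
  rw [PySem.List.foldl_pyRange_pyGetD xs 0
    (fun count v => if PySem.List.pyGetD xs (a : Int) 0 + v == 0 then count + 1 else count)
    c (by positivity)]
  rw [PySem.List.foldl_count_if]
  rw [PySem.List.pyGetD_ofNat xs a 0 ha]
  congr 1
  rw [Int.toNat_natCast]
  rw [List.count_eq_countP]
  congr 1
  refine List.countP_congr ?_
  intro v _
  rw [pv_match_beq]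

-- A's outer loop from index a accumulates pvS of the suffix
lemma pvA_outer (xs : List Int) (k a : Nat) (hk : xs.length - a = k) (ha : a ≤ xs.length)
    (c : Int) :
    (PySem.List.pyRange (a : Int) (PySem.List.len xs) 1).foldl
      (fun count i1 =>
        (PySem.List.pyRange i1 (PySem.List.len xs) 1).foldl
          (fun count i2 =>
            if PySem.List.pyGetD xs i1 0 + PySem.List.pyGetD xs i2 0 == 0 then count + 1
            else count) count) c
    = c + pvS (xs.drop a) := by
  induction k generalizing a c with
  | zero =>
    have hae : a = xs.length := by omega
    rw [PySem.List.pyRange_one_eq_nil (by simp [hae])]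
    simp [hae, pvS]
  | succ k ih =>
    have hlt : a < xs.length := by omega
    rw [PySem.List.pyRange_one_cons (by simp; omega)]
    rw [List.foldl_cons]
    rw [pvA_inner xs a hlt c]
    have hcast : ((a : Int) + 1) = ((a + 1 : Nat) : Int) := by push_cast; ring
    rw [hcast, ih (a + 1) (by omega) (by omega)]
    rw [List.drop_eq_getElem_cons hlt]
    show _ = c + pvS (xs[a] :: xs.drop (a + 1))
    rw [pvS]
    rw [← List.drop_eq_getElem_cons hlt]
    ring

lemma pvA_eq_S (xs : List Int) : count_zero_pairs xs = pvS xs := by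
  have h := pvA_outer xs xs.length 0 (by omega) (by omega) 0
  simpa [count_zero_pairs] using h

-- B's loop invariant: the dict is the counter of the prefix already consumed
lemma pvB_loop (t : List Int) (pre : List Int) (d : PySem.Dict Int Int) (c : Int)
    (hd : ∀ v, d.getD v 0 = (pre.count v : Int)) :
    (t.foldl
      (fun (st : Int × PySem.Dict Int Int) x =>
        let count := st.1 + st.2.getD (-x) 0
        let count := if x == 0 then count + 1 else count
        (count, st.2.insert x (st.2.getD x 0 + 1)))
      (c, d)).1 = c + pvP pre t := by
  induction t generalizing pre d c with
  | nil => simp [pvP]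
  | cons x r ih =>
    rw [List.foldl_cons]
    have hd' : ∀ v, (d.insert x (d.getD x 0 + 1)).getD v 0 = ((pre ++ [x]).count v : Int) := by
      intro v
      rw [PySem.Dict.getD_insert]
      by_cases hv : v = x
      · simp [hv, hd x, List.count_append]
      · simp [hv, hd v, List.count_append, List.count_singleton]
        intro hvx; exact absurd hvx.symm hv
    rw [ih (pre ++ [x]) _ _ hd']
    rw [pvP, hd (-x)]
    by_cases hx : x = 0 <;> simp [hx] <;> ring

lemma pvB_eq_P (xs : List Int) : count_zero_pairs_alt xs = pvP [] xs := by
  have h := pvB_loop xs [] PySem.Dict.empty 0 (by intro v; simp)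
  simpa [count_zero_pairs_alt] using h

lemma pvC_nil (t : List Int) : pvC [] t = 0 := by simp [pvC]

lemma pvS_add_C (t : List Int) : ∀ pre, pvS t + pvC pre t = pvP pre t := by
  induction t with
  | nil => intro pre; simp [pvS, pvP, pvC]
  | cons x r ih =>
    intro pre
    rw [pvP, ← ih (pre ++ [x])]
    -- pvS (x :: r)
    rw [pvS]
    have hSx : (((x :: r).count (-x) : Nat) : Int)
        = (if x = 0 then 1 else 0) + (r.count (-x) : Int) := by
      rw [List.count_cons]
      by_cases hx : x = 0
      · simp [hx]; ring
      · simp [hx, show ¬x = -x by omega]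
    -- pvC pre (x :: r)
    have hCc : pvC pre (x :: r) = (pre.count (-x) : Int) + pvC pre r := by
      unfold pvC
      have hmap : pre.map (fun a => (((x :: r).count (-a) : Nat) : Int))
          = pre.map (fun a => (if (a == -x : Bool) then (1:Int) else 0) + (r.count (-a) : Int)) := by
        apply List.map_congr_left
        intro a _
        rw [List.count_cons]
        by_cases hax : a = -x
        · simp [hax]; ring
        · have hxa : ¬ x = -a := by intro h; exact hax (by omega)
          simp [hax, hxa]
      rw [hmap, PySem.List.sum_map_add_int, PySem.List.sum_map_ite_one_zero]
      rw [List.count_eq_countP]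
    -- pvC (pre ++ [x]) r
    have hCa : pvC (pre ++ [x]) r = pvC pre r + (r.count (-x) : Int) := by
      unfold pvC
      simp
    rw [hSx, hCc, hCa]
    ring

theorem count_zero_pairs_spec : Claim_equal_count_zero_pairs := by
  intro xs _
  unfold Spec_count_zero_pairs
  rw [pvA_eq_S, pvB_eq_P, ← pvS_add_C xs [], pvC_nil, add_zero]
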